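-- pv_equiv track=rewrite | github.com/eswhat93/pythonstudy | 20200601.py | solution
-- ===== SOURCE A (Python) =====
-- import collections
--
-- def solution(clothes):
--     answer = 1
--     a=[]
--
--     for i in range(len(clothes)):
--         #kind 별 분리
--         a.append(clothes[i][1])
--     c = collections.Counter(a)
--
--     for k,v in c.items():
--         answer *= v
--     return answer
-- ===== SOURCE B (Python) =====
-- def solution(clothes):
--     # sort categories, then multiply the length of each run of equal categories
--     cats = sorted(r[1] for r in clothes)
--     answer = 1
--     i = 0
--     n = len(cats)
--     while i < n:
--         j = i + 1
--         while j < n and cats[j] == cats[i]: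
--             j += 1
--         answer *= j - i
--         i = j
--     return answer
-- ===== Notes on version B (the rewrite author's own statement) =====
-- stated objective: alternative
-- what changed: Replaces A's Counter-based counting (collect categories, build a hash counter, multiply its values) by sort-then-scan: sort the category list and multiply the length of each run of equal categories in one pass.
import Mathlib
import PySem

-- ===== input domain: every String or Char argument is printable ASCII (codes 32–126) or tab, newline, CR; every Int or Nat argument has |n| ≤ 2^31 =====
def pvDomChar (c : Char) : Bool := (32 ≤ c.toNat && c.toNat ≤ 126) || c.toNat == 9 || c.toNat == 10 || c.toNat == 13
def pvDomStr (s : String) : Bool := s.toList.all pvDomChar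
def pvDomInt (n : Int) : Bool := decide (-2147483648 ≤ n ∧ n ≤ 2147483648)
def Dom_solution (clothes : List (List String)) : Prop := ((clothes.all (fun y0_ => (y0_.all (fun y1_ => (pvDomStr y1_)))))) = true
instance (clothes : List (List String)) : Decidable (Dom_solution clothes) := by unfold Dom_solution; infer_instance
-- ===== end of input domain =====

-- B replaces A's Counter-based counting by sort-then-scan over runs of equal
-- categories: a genuinely different traversal of the same data ('alternative', not faster).

-- ===== PORT A =====
-- answer = 1; a = []; for i in range(len(clothes)): a.append(clothes[i][1]);
-- c = collections.Counter(a); for k, v in c.items(): answer *= v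
def solution (clothes : List (List String)) : Int :=
  (PySem.Dict.counter
      ((PySem.List.pyRange 0 (PySem.List.len clothes) 1).foldl
        (fun acc i => acc ++ [PySem.List.pyGetD (PySem.List.pyGetD clothes i []) 1 ""]) [])).items.foldl
    (fun answer kv => answer * kv.2) 1

-- ===== PORT B =====
-- the outer while loop of Source B: multiply in the length of the leading run
-- (1 + inner while's count) and continue on the remaining suffix
def runProd : List String → Int
  | [] => 1
  | x :: rest =>
      (((rest.takeWhile (fun y => y == x)).length : Int) + 1) *
        runProd (rest.dropWhile (fun y => y == x))
termination_by l => l.length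
decreasing_by
  simpa using Nat.lt_succ_of_le (List.length_dropWhile_le _ rest)

def solution_alt (clothes : List (List String)) : Int :=
  -- cats = sorted(r[1] for r in clothes)
  let cats := PySem.List.sorted (clothes.map (fun r => PySem.List.pyGetD r 1 "")) (fun x => x) false
  runProd cats

-- ===== PRECONDITION & SPEC =====
-- Pre_ excludes exactly the inputs where Python A raises IndexError on clothes[i][1]
def Pre_solution (clothes : List (List String)) : Prop := ∀ r ∈ clothes, 2 ≤ r.length
instance (clothes : List (List String)) : Decidable (Pre_solution clothes) := by
  unfold Pre_solution; infer_instance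
def pvWitness_solution : List (List String) :=
  [["yellow_hat", "headgear"], ["blue_sunglasses", "eyewear"], ["green_turban", "headgear"]]

def Spec_solution (clothes : List (List String)) (out : Int) : Prop := out = solution_alt clothes
instance (clothes : List (List String)) (out : Int) : Decidable (Spec_solution clothes out) := by
  unfold Spec_solution; infer_instance

-- ===== CLAIM (what is proved, stated in full; the proofs are below) =====
def Claim_equal_solution : Prop :=
  ∀ (clothes : List (List String)), Dom_solution clothes → Pre_solution clothes →
    Spec_solution clothes (solution clothes)

-- ===== LEMMAS AND PROOFS =====

-- the product of the multiplicities of the distinct elements of l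
def countProd (l : List String) : Int := ∏ x ∈ l.toFinset, (l.count x : Int)

lemma foldl_mul_snd (l : List (String × Int)) (c : Int) :
    l.foldl (fun answer kv => answer * kv.2) c = c * (l.map Prod.snd).prod := by
  induction l generalizing c with
  | nil => simp
  | cons kv t ih => simp [ih, mul_assoc]

lemma toFinset_perm {l l' : List String} (h : l.Perm l') : l.toFinset = l'.toFinset := by
  ext a; simp [List.mem_toFinset, h.mem_iff]

lemma countProd_perm {l l' : List String} (h : l.Perm l') : countProd l = countProd l' := by
  unfold countProd
  rw [toFinset_perm h]
  exact Finset.prod_congr rfl (fun x _ => by rw [h.count_eq])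

lemma solution_eq_countProd (clothes : List (List String)) :
    solution clothes = countProd (clothes.map (fun r => PySem.List.pyGetD r 1 "")) := by
  unfold solution
  rw [PySem.List.foldl_append_singleton_eq_map (fun i =>
        PySem.List.pyGetD (PySem.List.pyGetD clothes i []) 1 "")]
  have hmap : (PySem.List.pyRange 0 (PySem.List.len clothes) 1).map
      (fun i => PySem.List.pyGetD (PySem.List.pyGetD clothes i []) 1 "")
      = clothes.map (fun r => PySem.List.pyGetD r 1 "") := by
    conv_rhs => rw [← PySem.List.map_pyGetD_pyRange_zero clothes ([] : List String)]
    rw [List.map_map]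
    rfl
  rw [List.nil_append, hmap]
  set a := clothes.map (fun r => PySem.List.pyGetD r 1 "") with ha
  rw [foldl_mul_snd, PySem.Dict.items_counter, one_mul, List.map_map]
  unfold countProd
  have hcomp : (Prod.snd ∘ fun k : String => (k, (List.count k a : Int)))
      = fun k => (List.count k a : Int) := rfl
  rw [hcomp, ← List.prod_toFinset (fun x => (List.count x a : Int)) (PySem.Set.nodup_ofList a)]
  congr 1
  ext x
  simp [List.mem_toFinset, PySem.Set.mem_ofList]

lemma runProd_eq_countProd : ∀ (l : List String), l.Pairwise (· ≤ ·) → runProd l = countProd l := by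
  intro l
  induction l using runProd.induct with
  | case1 => intro _; simp [runProd, countProd]
  | case2 x rest ih =>
    intro hp
    set t := rest.takeWhile (fun y => y == x) with ht
    set d := rest.dropWhile (fun y => y == x) with hd
    have hrest : t ++ d = rest := List.takeWhile_append_dropWhile
    have hpr : rest.Pairwise (· ≤ ·) := hp.of_cons
    have hxle : ∀ y ∈ rest, x ≤ y := fun y hy => List.rel_of_pairwise_cons hp hy
    have htx : ∀ y ∈ t, y = x := by
      intro y hy
      have := List.mem_takeWhile_imp hy
      simpa using this
    have hpd : d.Pairwise (· ≤ ·) := hpr.sublist (hd ▸ List.dropWhile_sublist _)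
    have hxd : x ∉ d := by
      intro hxmem
      cases hdd : d with
      | nil => rw [hdd] at hxmem; simp at hxmem
      | cons y0 d' =>
        have hdd' : List.dropWhile (fun y => y == x) rest = y0 :: d' := by
          rw [← hd]; exact hdd
        have hy0x : y0 ≠ x := by
          have hne : List.dropWhile (fun y => y == x) rest ≠ [] := by simp [hdd']
          have h := List.head_dropWhile_not (fun y => y == x) hne
          simp only [hdd', List.head_cons] at h
          simpa using h
        rw [hdd] at hxmem
        rcases List.mem_cons.mp hxmem with h | h
        · exact hy0x h.symm
        · -- x in the tail of d: y0 ≤ x and x ≤ y0 force y0 = x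
          have h1 : y0 ≤ x := by
            rw [hdd] at hpd
            exact List.rel_of_pairwise_cons hpd h
          have h2 : x ≤ y0 := hxle y0 (by
            rw [← hrest, hdd]; exact List.mem_append_right _ (List.mem_cons_self))
          exact hy0x (le_antisymm h1 h2)
    have hcount : ((x :: rest).count x : Int) = (t.length : Int) + 1 := by
      have h1 : rest.count x = t.count x + d.count x := by
        rw [← hrest]; exact List.count_append ..
      have h2 : t.count x = t.length := List.count_eq_length.mpr (fun b hb => (htx b hb).symm)
      have h3 : d.count x = 0 := List.count_eq_zero.mpr hxd
      have : (x :: rest).count x = t.length + 1 := by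
        rw [List.count_cons_self, h1, h2, h3]
      rw [this]; push_cast; ring
    have hfs : (x :: rest).toFinset = insert x d.toFinset := by
      ext a
      simp only [List.toFinset_cons, Finset.mem_insert, List.mem_toFinset]
      constructor
      · rintro (h | h)
        · exact Or.inl h
        · rw [← hrest] at h
          rcases List.mem_append.mp h with h | h
          · exact Or.inl (htx a h)
          · exact Or.inr h
      · rintro (h | h)
        · exact Or.inl h
        · exact Or.inr (by rw [← hrest]; exact List.mem_append_right _ h)
    have hcnt_d : ∀ y ∈ d.toFinset, ((x :: rest).count y : Int) = (d.count y : Int) := by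
      intro y hy
      rw [List.mem_toFinset] at hy
      have hyx : y ≠ x := fun h => hxd (h ▸ hy)
      have hyt : y ∉ t := fun h => hyx (htx y h)
      have : (x :: rest).count y = d.count y := by
        rw [List.count_cons_of_ne (Ne.symm hyx), ← hrest, List.count_append,
            List.count_eq_zero.mpr hyt, Nat.zero_add]
      rw [this]
    have hnd : x ∉ d.toFinset := by rw [List.mem_toFinset]; exact hxd
    calc runProd (x :: rest)
        = ((t.length : Int) + 1) * runProd d := by rw [runProd]
      _ = ((t.length : Int) + 1) * countProd d := by rw [ih hpd]
      _ = countProd (x :: rest) := by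
          unfold countProd
          rw [hfs, Finset.prod_insert hnd, hcount,
              Finset.prod_congr rfl hcnt_d]

-- ===== VERDICT (by name: the statement is the Claim_ definition above) =====
theorem solution_spec : Claim_equal_solution := by
  intro clothes _ _
  unfold Spec_solution solution_alt
  set a := clothes.map (fun r => PySem.List.pyGetD r 1 "") with ha
  have hperm : (PySem.List.sorted a (fun x => x) false).Perm a :=
    PySem.List.sorted_perm a (fun x => x) false
  have hpair : (PySem.List.sorted a (fun x => x) false).Pairwise (· ≤ ·) := by
    simpa using PySem.List.sorted_pairwise a (fun x => x)
  rw [solution_eq_countProd, ← ha, countProd_perm hperm.symm,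
      ← runProd_eq_countProd _ hpair]
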